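-- pv_equiv track=rewrite | github.com/mbronis/algos | coderbyte.py | ClosestEnemyII
-- ===== SOURCE A (Python) =====
-- def ClosestEnemyII(strArr):
--     m = [list(r) for r in strArr]
--
--     pos_foes = []
--
--     for ir, r in enumerate(m):
--         for ic, c in enumerate(r):
--             if c == '1':
--                 pos_friend = (ir, ic)
--             if c == '2':
--                 pos_foes.append((ir, ic))
--
--     if len(pos_foes) == 0:
--         return 0
--
--     r, c = len(m), len(m[0])
--     min_dist = r + c
--
--     for pos_foe in pos_foes:
--         dist_r = min([abs((pos_friend[0] + s) % r - (pos_foe[0] + s) % r) for s in range(r)])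
--         dist_c = min([abs((pos_friend[1] + s) % c - (pos_foe[1] + s) % c) for s in range(c)])
--         if dist_r + dist_c < min_dist:
--             min_dist = dist_r + dist_c
--
--     return min_dist
-- ===== SOURCE B (Python) =====
-- def ClosestEnemyII(strArr):
--     friend = None
--     foes = []
--     for ir, row in enumerate(strArr):
--         for ic, ch in enumerate(row):
--             if ch == '1':
--                 friend = (ir, ic)
--             elif ch == '2':
--                 foes.append((ir, ic))
--     if not foes:
--         return 0
--     fr, fc = friend
--     r, c = len(strArr), len(strArr[0])
--
--     def circ(d, n):
--         d %= n
--         return min(d, n - d)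
--
--     return min(circ(fr - er, r) + circ(fc - ec, c) for er, ec in foes)
-- ===== Notes on version B (the rewrite author's own statement) =====
-- stated objective: faster
-- what changed: Replaces the per-foe shift-minimisation loops (min over all cyclic shifts of row/column index differences) by the closed-form circular distance min(d mod n, n - d mod n); Pre_ only excludes the inputs where A raises (a foe '2' but no friend '1', or an empty first row).
import Mathlib
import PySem

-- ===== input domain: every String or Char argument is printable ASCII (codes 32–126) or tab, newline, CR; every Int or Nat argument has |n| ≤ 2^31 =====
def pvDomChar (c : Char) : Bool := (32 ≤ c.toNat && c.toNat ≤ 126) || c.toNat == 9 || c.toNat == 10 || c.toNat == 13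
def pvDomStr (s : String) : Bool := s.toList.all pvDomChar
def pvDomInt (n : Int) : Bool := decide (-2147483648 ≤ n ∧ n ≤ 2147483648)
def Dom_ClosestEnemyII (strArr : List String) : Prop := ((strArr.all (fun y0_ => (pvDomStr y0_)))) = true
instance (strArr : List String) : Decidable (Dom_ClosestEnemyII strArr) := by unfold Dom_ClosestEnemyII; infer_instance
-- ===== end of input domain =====

-- B replaces A's per-foe shift-minimisation loops by the closed-form circular distance
-- min(d mod n, n - d mod n) (asymptotically fewer operations per foe).

-- ===== PORT A =====
def ClosestEnemyII (strArr : List String) : Int :=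
  let m : List (List Char) := strArr.map (fun r => r.toList)
  -- nested scan: pos_friend is overwritten on each '1', pos_foes appended on each '2'
  let st : Option (Int × Int) × List (Int × Int) :=
    (PySem.List.enumerate m 0).foldl (fun st p =>
      (PySem.List.enumerate p.2 0).foldl (fun st q =>
        let st := if q.2 = '1' then (some (p.1, q.1), st.2) else st
        if q.2 = '2' then (st.1, st.2 ++ [(p.1, q.1)]) else st) st)
      (none, [])
  let posFoes := st.2
  if posFoes.length = 0 then 0
  else
    let r : Int := m.length
    let c : Int := (m.headD []).length  -- m[0]; safe: posFoes ≠ [] ⇒ m ≠ []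
    let friend : Int × Int := st.1.getD (0, 0)  -- Python would raise NameError if no '1'; excluded by Pre_
    posFoes.foldl (fun minDist foe =>
      -- min([...]) of an empty comprehension raises in Python (c = 0); excluded by Pre_
      let distR := (PySem.List.min? ((PySem.List.pyRange 0 r 1).map (fun s =>
        |PySem.Int.mod (friend.1 + s) r - PySem.Int.mod (foe.1 + s) r|)) (fun x => x)).getD 0
      let distC := (PySem.List.min? ((PySem.List.pyRange 0 c 1).map (fun s =>
        |PySem.Int.mod (friend.2 + s) c - PySem.Int.mod (foe.2 + s) c|)) (fun x => x)).getD 0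
      if distR + distC < minDist then distR + distC else minDist) (r + c)

-- ===== PORT B =====
-- circ d n = circular distance: helper `circ` of Source B
def circB (d n : Int) : Int :=
  let d' := PySem.Int.mod d n
  min d' (n - d')

def ClosestEnemyII_alt (strArr : List String) : Int :=
  -- one pass: friend is overwritten on each '1', foes appended on each '2'
  let st : Option (Int × Int) × List (Int × Int) :=
    (PySem.List.enumerate strArr 0).foldl (fun st p =>
      (PySem.List.enumerate p.2.toList 0).foldl (fun st q =>
        if q.2 = '1' then (some (p.1, q.1), st.2)
        else if q.2 = '2' then (st.1, st.2 ++ [(p.1, q.1)])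
        else st) st)
      (none, [])
  let foes := st.2
  if foes.isEmpty then 0
  else
    let friend : Int × Int := st.1.getD (0, 0)  -- friend = None unpack raises if no '1'; excluded by Pre_
    let r : Int := strArr.length
    let c : Int := PySem.Str.len (strArr.headD "")  -- circ with n = 0 raises; excluded by Pre_
    (PySem.List.min? (foes.map (fun e => circB (friend.1 - e.1) r + circB (friend.2 - e.2) c))
      (fun x => x)).getD 0

-- ===== PRECONDITION & SPEC =====
-- Pre_ excludes exactly the inputs where A raises: a grid containing a foe '2' but either
-- no friend '1' (NameError: pos_friend unbound) or an empty first row (ValueError: min of an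
-- empty sequence, since c = 0). B also raises on those inputs (TypeError / ZeroDivisionError).
def Pre_ClosestEnemyII (strArr : List String) : Prop :=
  (∃ row ∈ strArr, '2' ∈ row.toList) →
    ((∃ row ∈ strArr, '1' ∈ row.toList) ∧ 0 < PySem.Str.len (strArr.headD ""))
instance (strArr : List String) : Decidable (Pre_ClosestEnemyII strArr) := by
  unfold Pre_ClosestEnemyII; infer_instance

def pvWitness_ClosestEnemyII : List String := ["102"]

def Spec_ClosestEnemyII (strArr : List String) (out : Int) : Prop := out = ClosestEnemyII_alt strArr
instance (strArr : List String) (out : Int) : Decidable (Spec_ClosestEnemyII strArr out) := by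
  unfold Spec_ClosestEnemyII; infer_instance

-- ===== CLAIM (what is proved, stated in full; the proofs are below) =====
def Claim_equal_ClosestEnemyII : Prop := ∀ (strArr : List String), Dom_ClosestEnemyII strArr → Pre_ClosestEnemyII strArr → Spec_ClosestEnemyII strArr (ClosestEnemyII strArr)

-- ===== LEMMAS AND PROOFS =====

-- final value of a repeatedly-overwritten Option variable
def pvLastSome {α : Type} (l : List α) (o : Option α) : Option α :=
  l.foldl (fun _ x => some x) o

lemma pvLastSome_append {α : Type} (u v : List α) (o : Option α) :
    pvLastSome (u ++ v) o = pvLastSome v (pvLastSome u o) := List.foldl_append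

def pvRowCells (ch : Char) (i : Int) (row : List Char) : List (Int × Int) :=
  ((PySem.List.enumerate row 0).filter (fun q => q.2 = ch)).map (fun q => (i, q.1))

def pvCells (ch : Char) (ps : List (Int × List Char)) : List (Int × Int) :=
  ps.flatMap (fun p => pvRowCells ch p.1 p.2)

-- the inner scan over one (already enumerated) row
lemma pv_inner (i : Int) (qs : List (Int × Char)) :
    ∀ st : Option (Int × Int) × List (Int × Int),
    qs.foldl (fun st q =>
        let st := if q.2 = '1' then (some (i, q.1), st.2) else st
        if q.2 = '2' then (st.1, st.2 ++ [(i, q.1)]) else st) st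
    = (pvLastSome ((qs.filter (fun q => q.2 = '1')).map (fun q => (i, q.1))) st.1,
       st.2 ++ (qs.filter (fun q => q.2 = '2')).map (fun q => (i, q.1))) := by
  induction qs with
  | nil => intro st; simp [pvLastSome]
  | cons q t ih =>
      intro st
      by_cases h1 : q.2 = '1' <;> by_cases h2 : q.2 = '2'
      · rw [h1] at h2; exact absurd h2 (by decide)
      · simp [List.foldl_cons, h1, ih]; rfl
      · simp [List.foldl_cons, h2, ih]
      · simp [List.foldl_cons, h1, h2, ih]

-- the whole nested scan
lemma pv_scan (ps : List (Int × List Char)) :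
    ∀ st : Option (Int × Int) × List (Int × Int),
    ps.foldl (fun st p =>
      (PySem.List.enumerate p.2 0).foldl (fun st q =>
        let st := if q.2 = '1' then (some (p.1, q.1), st.2) else st
        if q.2 = '2' then (st.1, st.2 ++ [(p.1, q.1)]) else st) st) st
    = (pvLastSome (pvCells '1' ps) st.1, st.2 ++ pvCells '2' ps) := by
  induction ps with
  | nil => intro st; simp [pvCells, pvLastSome]
  | cons p t ih =>
      intro st
      rw [List.foldl_cons, pv_inner, ih]
      simp [pvCells, pvLastSome_append, pvRowCells]

lemma pv_enum_map {α β : Type} (f : α → β) (l : List α) :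
    ∀ s : Int, PySem.List.enumerate (l.map f) s
      = (PySem.List.enumerate l s).map (fun p => (p.1, f p.2)) := by
  induction l with
  | nil => intro s; simp [PySem.List.enumerate_nil]
  | cons x t ih => intro s; simp [PySem.List.enumerate_cons, ih]

-- x - y is congruent to d mod n and both sides are in [0, n): two possible values
lemma pv_two_vals (n x y d : Int) (hn : 0 < n) (hx : 0 ≤ x ∧ x < n) (hy : 0 ≤ y ∧ y < n)
    (hd : 0 ≤ d ∧ d < n) (hc : (x - y) % n = d) : x - y = d ∨ x - y = d - n := by
  have hdm := Int.mul_ediv_add_emod (x - y) n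
  rw [hc] at hdm
  set q := (x - y) / n with hq
  have h1 : q < 1 := by
    have : n * q < n * 1 := by omega
    exact lt_of_mul_lt_mul_left this (le_of_lt hn)
  have h2 : (-2 : Int) < q := by
    have : n * (-2) < n * q := by omega
    exact lt_of_mul_lt_mul_left this (le_of_lt hn)
  interval_cases q <;> omega

lemma pv_shift_mem (a b n : Int) (hn : 0 < n) (s : Int) :
    min ((a - b) % n) (n - (a - b) % n) ≤ |(a + s) % n - (b + s) % n| := by
  set d := (a - b) % n with hd
  have hd0 : 0 ≤ d ∧ d < n := ⟨Int.emod_nonneg _ (by omega), Int.emod_lt_of_pos _ hn⟩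
  have hx : 0 ≤ (a + s) % n ∧ (a + s) % n < n :=
    ⟨Int.emod_nonneg _ (by omega), Int.emod_lt_of_pos _ hn⟩
  have hy : 0 ≤ (b + s) % n ∧ (b + s) % n < n :=
    ⟨Int.emod_nonneg _ (by omega), Int.emod_lt_of_pos _ hn⟩
  have hc : ((a + s) % n - (b + s) % n) % n = d := by
    rw [← Int.sub_emod]
    have : a + s - (b + s) = a - b := by ring
    rw [this]
  rcases pv_two_vals n _ _ d hn hx hy hd0 hc with h | h
  · rw [h, abs_of_nonneg hd0.1]; exact min_le_left _ _
  · rw [h, abs_of_nonpos (by omega), neg_sub]; exact min_le_right _ _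

lemma pv_add_emod_emod (u v n : Int) : (u + v % n) % n = (u + v) % n := by
  rw [Int.add_emod, Int.emod_emod_of_dvd _ (dvd_refl n), ← Int.add_emod]

-- the shift-minimisation loop computes exactly the circular distance
lemma pv_shiftMin (a b n : Int) (hn : 0 < n) :
    (PySem.List.min? ((PySem.List.pyRange 0 n 1).map (fun s =>
      |PySem.Int.mod (a + s) n - PySem.Int.mod (b + s) n|)) (fun x => x)).getD 0
    = circB (a - b) n := by
  have hmod : ∀ t : Int, PySem.Int.mod t n = t % n := fun t =>
    PySem.Int.mod_eq_emod_of_pos hn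
  set d := (a - b) % n with hdd
  have hd0 : 0 ≤ d ∧ d < n := ⟨Int.emod_nonneg _ (by omega), Int.emod_lt_of_pos _ hn⟩
  have hcirc : circB (a - b) n = min d (n - d) := by
    simp only [circB, hmod, hdd]
  -- one shift attains min d (n - d)
  have hattain : ∃ s, (0 ≤ s ∧ s < n) ∧ |(a + s) % n - (b + s) % n| = min d (n - d) := by
    by_cases hdn : d ≤ n - d
    · refine ⟨(-b) % n, ⟨Int.emod_nonneg _ (by omega), Int.emod_lt_of_pos _ hn⟩, ?_⟩
      have h1 : (a + (-b) % n) % n = d := by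
        rw [pv_add_emod_emod]
        have : a + -b = a - b := by ring
        rw [this]
      have h2 : (b + (-b) % n) % n = 0 := by
        rw [pv_add_emod_emod]
        simp
      rw [h1, h2, sub_zero, abs_of_nonneg hd0.1, min_eq_left hdn]
    · refine ⟨(-a) % n, ⟨Int.emod_nonneg _ (by omega), Int.emod_lt_of_pos _ hn⟩, ?_⟩
      have h1 : (a + (-a) % n) % n = 0 := by
        rw [pv_add_emod_emod]
        simp
      have h2 : (b + (-a) % n) % n = n - d := by
        rw [pv_add_emod_emod]
        have hu : b + -a = -(a - b) := by ring
        rw [hu]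
        have hsum : ((-(a - b)) % n + d) % n = 0 := by
          rw [hdd, ← Int.add_emod]
          simp
        set u := (-(a - b)) % n with hu2
        have hub : 0 ≤ u ∧ u < n := ⟨Int.emod_nonneg _ (by omega), Int.emod_lt_of_pos _ hn⟩
        have hdpos : 0 < d := by omega
        have hdm := Int.mul_ediv_add_emod (u + d) n
        rw [hsum] at hdm
        set q := (u + d) / n with hq
        have hq1 : q < 2 := by
          have : n * q < n * 2 := by omega
          exact lt_of_mul_lt_mul_left this (le_of_lt hn)
        have hq2 : 0 < q := by
          have : n * 0 < n * q := by omega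
          exact lt_of_mul_lt_mul_left this (le_of_lt hn)
        have hq3 : q = 1 := by omega
        rw [hq3, mul_one] at hdm
        omega
      rw [h1, h2, abs_of_nonpos (by omega), min_eq_right (by omega)]
      omega
  -- the list is nonempty, so min? is some m; squeeze m
  obtain ⟨s0, hs0, hval⟩ := hattain
  have hsmem : s0 ∈ PySem.List.pyRange 0 n 1 := by
    rw [PySem.List.mem_pyRange_one]; omega
  set L := (PySem.List.pyRange 0 n 1).map (fun s =>
    |PySem.Int.mod (a + s) n - PySem.Int.mod (b + s) n|) with hL
  have hmemL : min d (n - d) ∈ L := by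
    rw [hL]
    refine List.mem_map.mpr ⟨s0, hsmem, ?_⟩
    rw [hmod, hmod, hval]
  rcases hm : PySem.List.min? L (fun x => x) with _ | m
  · rw [PySem.List.min?_eq_none_iff] at hm
    rw [hm] at hmemL; exact absurd hmemL (List.not_mem_nil)
  · have hmm := PySem.List.min?_mem hm
    have hmin := PySem.List.min?_isMin hm
    have h1 : m ≤ min d (n - d) := hmin _ hmemL
    have h2 : min d (n - d) ≤ m := by
      rw [hL] at hmm
      obtain ⟨s, hs, hsv⟩ := List.mem_map.mp hmm
      rw [hmod, hmod] at hsv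
      rw [← hsv]
      exact pv_shift_mem a b n hn s
    rw [hcirc, Option.getD_some]
    omega

-- the running strict-less minimum over dists equals min() of the mapped list
lemma pv_fold_min (f : Int × Int → Int) (l : List (Int × Int)) (hl : l ≠ []) (init : Int)
    (h0 : ∀ e ∈ l, f e < init) :
    l.foldl (fun md e => if f e < md then f e else md) init
    = (PySem.List.min? (l.map f) (fun x => x)).getD 0 := by
  have hstep : (fun (md : Int) (e : Int × Int) => if f e < md then f e else md)
      = fun md e => min md (f e) := by
    funext md e
    rw [min_def]
    split_ifs <;> omega
  cases l with
  | nil => exact absurd rfl hl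
  | cons e0 t =>
      rw [List.map_cons, PySem.List.min?_id_cons, Option.getD_some, hstep, List.foldl_cons,
        List.foldl_map]
      have h1 : min init (f e0) = f e0 := min_eq_right (le_of_lt (h0 e0 (by simp)))
      rw [h1]

def pvCellsS (ch : Char) (strArr : List String) : List (Int × Int) :=
  (PySem.List.enumerate strArr 0).flatMap (fun p => pvRowCells ch p.1 p.2.toList)

lemma pvCells_map_eq (ch : Char) (strArr : List String) :
    pvCells ch ((PySem.List.enumerate strArr 0).map (fun p => (p.1, p.2.toList)))
    = pvCellsS ch strArr := by
  simp [pvCells, pvCellsS, List.flatMap_map]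

lemma pv_mem_snd {α : Type} (l : List α) (x : α) :
    x ∈ l ↔ ∃ p ∈ PySem.List.enumerate l 0, p.2 = x := by
  conv_lhs => rw [← PySem.List.map_snd_enumerate l 0]
  exact List.mem_map

lemma pvCellsS_eq_nil_iff (ch : Char) (strArr : List String) :
    pvCellsS ch strArr = [] ↔ ∀ row ∈ strArr, ch ∉ row.toList := by
  simp only [pvCellsS, List.flatMap_eq_nil_iff, pvRowCells, List.map_eq_nil_iff,
    List.filter_eq_nil_iff, decide_eq_true_eq]
  constructor
  · intro h row hrow hch
    obtain ⟨p, hp, hps⟩ := (pv_mem_snd strArr row).mp hrow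
    obtain ⟨q, hq, hqs⟩ := (pv_mem_snd row.toList ch).mp hch
    exact h p hp q (by rw [hps]; exact hq) hqs
  · intro h p hp q hq hqc
    have hrow : p.2 ∈ strArr := (pv_mem_snd strArr p.2).mpr ⟨p, hp, rfl⟩
    have hm : q.2 ∈ p.2.toList := (pv_mem_snd p.2.toList q.2).mpr ⟨q, hq, rfl⟩
    exact h p.2 hrow (hqc ▸ hm)

-- B's one-pass scan computes the same (last '1', all '2's) pair
lemma pv_scanB (strArr : List String) :
    (PySem.List.enumerate strArr 0).foldl (fun st p =>
      (PySem.List.enumerate p.2.toList 0).foldl (fun st q =>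
        if q.2 = '1' then (some (p.1, q.1), st.2)
        else if q.2 = '2' then (st.1, st.2 ++ [(p.1, q.1)])
        else st) st) ((none : Option (Int × Int)), ([] : List (Int × Int)))
    = (pvLastSome (pvCellsS '1' strArr) none, pvCellsS '2' strArr) := by
  have hbody : ∀ (i : Int), (fun (st : Option (Int × Int) × List (Int × Int)) (q : Int × Char) =>
      if q.2 = '1' then (some (i, q.1), st.2)
      else if q.2 = '2' then (st.1, st.2 ++ [(i, q.1)]) else st)
    = (fun st q =>
      let st := if q.2 = '1' then (some (i, q.1), st.2) else st
      if q.2 = '2' then (st.1, st.2 ++ [(i, q.1)]) else st) := by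
    intro i; funext st q
    by_cases h1 : q.2 = '1' <;> by_cases h2 : q.2 = '2'
    · rw [h1] at h2; exact absurd h2 (by decide)
    · simp [h1]
    · simp [h2]
    · simp [h1, h2]
  have hmap : (PySem.List.enumerate strArr 0).foldl (fun st p =>
      (PySem.List.enumerate p.2.toList 0).foldl (fun st q =>
        if q.2 = '1' then (some (p.1, q.1), st.2)
        else if q.2 = '2' then (st.1, st.2 ++ [(p.1, q.1)])
        else st) st) ((none : Option (Int × Int)), ([] : List (Int × Int)))
    = ((PySem.List.enumerate strArr 0).map (fun p => (p.1, p.2.toList))).foldl (fun st p =>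
        (PySem.List.enumerate p.2 0).foldl (fun st q =>
          let st := if q.2 = '1' then (some (p.1, q.1), st.2) else st
          if q.2 = '2' then (st.1, st.2 ++ [(p.1, q.1)]) else st) st) (none, []) := by
    rw [List.foldl_map]
    congr 1
    funext st p
    rw [hbody p.1]
  rw [hmap, pv_scan, pvCells_map_eq, pvCells_map_eq]
  rfl

lemma pv_circB_lt (x n : Int) (hn : 0 < n) : circB x n < n := by
  have h1 : PySem.Int.mod x n = x % n := PySem.Int.mod_eq_emod_of_pos hn
  have h2 : 0 ≤ x % n := Int.emod_nonneg _ (by omega)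
  have h3 : x % n < n := Int.emod_lt_of_pos _ hn
  unfold circB
  rw [h1, min_def]
  split_ifs <;> omega

-- the whole distance loop, replaced by the closed form
lemma pv_final (friend : Int × Int) (r c : Int) (hr : 0 < r) (hc : 0 < c)
    (l : List (Int × Int)) (hl : l ≠ []) :
    l.foldl (fun minDist foe =>
      if (PySem.List.min? ((PySem.List.pyRange 0 r 1).map (fun s =>
            |PySem.Int.mod (friend.1 + s) r - PySem.Int.mod (foe.1 + s) r|)) (fun x => x)).getD 0
          + (PySem.List.min? ((PySem.List.pyRange 0 c 1).map (fun s =>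
            |PySem.Int.mod (friend.2 + s) c - PySem.Int.mod (foe.2 + s) c|)) (fun x => x)).getD 0
          < minDist
      then (PySem.List.min? ((PySem.List.pyRange 0 r 1).map (fun s =>
            |PySem.Int.mod (friend.1 + s) r - PySem.Int.mod (foe.1 + s) r|)) (fun x => x)).getD 0
          + (PySem.List.min? ((PySem.List.pyRange 0 c 1).map (fun s =>
            |PySem.Int.mod (friend.2 + s) c - PySem.Int.mod (foe.2 + s) c|)) (fun x => x)).getD 0
      else minDist) (r + c)
    = (PySem.List.min? (l.map (fun e => circB (friend.1 - e.1) r + circB (friend.2 - e.2) c))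
        (fun x => x)).getD 0 := by
  have h1 : l.foldl (fun minDist foe =>
      if (PySem.List.min? ((PySem.List.pyRange 0 r 1).map (fun s =>
            |PySem.Int.mod (friend.1 + s) r - PySem.Int.mod (foe.1 + s) r|)) (fun x => x)).getD 0
          + (PySem.List.min? ((PySem.List.pyRange 0 c 1).map (fun s =>
            |PySem.Int.mod (friend.2 + s) c - PySem.Int.mod (foe.2 + s) c|)) (fun x => x)).getD 0
          < minDist
      then (PySem.List.min? ((PySem.List.pyRange 0 r 1).map (fun s =>
            |PySem.Int.mod (friend.1 + s) r - PySem.Int.mod (foe.1 + s) r|)) (fun x => x)).getD 0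
          + (PySem.List.min? ((PySem.List.pyRange 0 c 1).map (fun s =>
            |PySem.Int.mod (friend.2 + s) c - PySem.Int.mod (foe.2 + s) c|)) (fun x => x)).getD 0
      else minDist) (r + c)
      = l.foldl (fun (md : Int) (e : Int × Int) =>
          if circB (friend.1 - e.1) r + circB (friend.2 - e.2) c < md
          then circB (friend.1 - e.1) r + circB (friend.2 - e.2) c else md) (r + c) := by
    apply List.foldl_ext
    intro md e he
    simp only [pv_shiftMin _ _ _ hr, pv_shiftMin _ _ _ hc]
  rw [h1]
  exact pv_fold_min (fun e => circB (friend.1 - e.1) r + circB (friend.2 - e.2) c) l hl (r + c)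
    (fun e _ => by
      have hx := pv_circB_lt (friend.1 - e.1) r hr
      have hy := pv_circB_lt (friend.2 - e.2) c hc
      dsimp only
      omega)

-- ===== VERDICT (by name: the statement is the Claim_ definition above) =====
theorem ClosestEnemyII_spec : Claim_equal_ClosestEnemyII := by
  intro strArr _ hpre
  show ClosestEnemyII strArr = ClosestEnemyII_alt strArr
  simp only [ClosestEnemyII, ClosestEnemyII_alt]
  rw [pv_enum_map, pv_scan, pvCells_map_eq, pvCells_map_eq, pv_scanB]
  simp only [List.nil_append]
  by_cases hfe : pvCellsS '2' strArr = []
  · rw [hfe]; simp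
  · have hlen : ¬((pvCellsS '2' strArr).length = 0) := by
      rw [List.length_eq_zero_iff]; exact hfe
    have hemp : ¬((pvCellsS '2' strArr).isEmpty = true) := by
      rw [List.isEmpty_iff]; exact hfe
    rw [if_neg hlen, if_neg hemp]
    have hfoe : ∃ row ∈ strArr, '2' ∈ row.toList := by
      by_contra h
      push Not at h
      exact hfe ((pvCellsS_eq_nil_iff '2' strArr).mpr h)
    obtain ⟨-, hc⟩ := hpre hfoe
    have hsne : strArr ≠ [] := by
      rintro rfl
      obtain ⟨row, hr, -⟩ := hfoe
      exact absurd hr (List.not_mem_nil)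
    have hr0 : 0 < (strArr.length : Int) := by
      cases strArr with
      | nil => exact absurd rfl hsne
      | cons h t => simp
    have hcA : ((((strArr.map (fun r => r.toList)).headD []).length : Nat) : Int)
        = PySem.Str.len (strArr.headD "") := by
      cases strArr with
      | nil => exact absurd rfl hsne
      | cons h t => simp [PySem.Str.len_eq]
    rw [List.length_map, hcA]
    exact pv_final ((pvLastSome (pvCellsS '1' strArr) none).getD (0, 0)) (strArr.length : Int)
      (PySem.Str.len (strArr.headD "")) hr0 hc (pvCellsS '2' strArr) hfe
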